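-- pv_equiv track=rewrite | github.com/dawoodaijaz97/Leetcode | maximum-balanced-shipments/solution.py | solve
-- ===== SOURCE A (Python) =====
-- def solve(weight: list[int]) -> int:
--     n = len(weight)
--     max_weight = [0] * n
--     current_max = 0
--
--     for i in range(n):
--         current_max = max(current_max, weight[i])
--         max_weight[i] = current_max
--
--     count = 0
--     last_shipment_end = -1
--
--     for i in range(n - 1, last_shipment_end, -1):
--         if weight[i] < max_weight[i]:
--             count += 1
--             last_shipment_end = i - 1
--
--     return count
-- ===== SOURCE B (Python) =====
-- def solve(weight: list[int]) -> int:
--     count = 0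
--     cur = 0
--     for w in weight:
--         if w < cur:
--             count += 1
--         cur = max(cur, w)
--     return count
-- ===== Notes on version B (the rewrite author's own statement) =====
-- stated objective: simpler
-- what changed: Replaced A's two passes (build a prefix-max array, then scan it backwards with an unused last_shipment_end state) by one forward streaming pass keeping only the running maximum and the count, comparing each element before updating the maximum; no array is materialized.
import Mathlib
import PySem

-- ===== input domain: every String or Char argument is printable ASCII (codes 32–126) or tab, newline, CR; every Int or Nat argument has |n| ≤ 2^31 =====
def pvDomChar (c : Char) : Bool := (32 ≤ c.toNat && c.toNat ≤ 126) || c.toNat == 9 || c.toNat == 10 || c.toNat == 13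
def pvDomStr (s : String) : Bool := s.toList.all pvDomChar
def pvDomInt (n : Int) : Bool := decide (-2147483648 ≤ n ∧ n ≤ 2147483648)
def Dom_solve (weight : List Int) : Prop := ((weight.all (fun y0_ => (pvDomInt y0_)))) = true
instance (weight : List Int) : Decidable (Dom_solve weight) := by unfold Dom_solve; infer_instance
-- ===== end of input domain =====

-- B replaces A's two passes (prefix-max array + backward scan) by one forward
-- streaming pass with a running maximum; simpler, no array materialized.

-- ===== PORT A =====
-- literal transliteration of A: first loop fills max_weight[i] with the running
-- maximum; second loop walks i = n-1 .. 0 (range built while last_shipment_end = -1)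
-- carrying (count, last_shipment_end) as state.
def solve (weight : List Int) : Int :=
  let n : Int := weight.length
  let s1 := (PySem.List.pyRange 0 n 1).foldl
      (fun (s : Int × List Int) i =>
        let cm := max s.1 (PySem.List.pyGetD weight i 0)
        (cm, PySem.List.pySetD s.2 i cm))
      (0, List.replicate weight.length 0)
  let maxw := s1.2
  let s2 := (PySem.List.pyRange (n - 1) (-1) (-1)).foldl
      (fun (s : Int × Int) i =>
        if PySem.List.pyGetD weight i 0 < PySem.List.pyGetD maxw i 0 then
          (s.1 + 1, i - 1)
        else s)
      (0, -1)
  s2.1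

-- ===== PORT B =====
def solve_alt (weight : List Int) : Int :=
  (weight.foldl
      (fun (s : Int × Int) w =>
        (if w < s.2 then s.1 + 1 else s.1, max s.2 w))
      (0, 0)).1

-- ===== PRECONDITION & SPEC =====
def Spec_solve (weight : List Int) (out : Int) : Prop := out = solve_alt weight
instance (weight : List Int) (out : Int) : Decidable (Spec_solve weight out) := by unfold Spec_solve; infer_instance

-- ===== CLAIM (what is proved, stated in full; the proofs are below) =====
def Claim_equal_solve : Prop := ∀ (weight : List Int), Dom_solve weight → Spec_solve weight (solve weight)

-- ===== LEMMAS AND PROOFS =====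

/-- The prefix-max list: `pmax c xs` has at index i the max of `c` and `xs[0..i]`. -/
def pmax (c : Int) : List Int → List Int
  | [] => []
  | w :: t => max c w :: pmax (max c w) t

@[simp] lemma pmax_nil (c : Int) : pmax c [] = [] := rfl
@[simp] lemma pmax_cons (c w : Int) (t : List Int) :
    pmax c (w :: t) = max c w :: pmax (max c w) t := rfl

/-- B's count from a given running maximum `c`. -/
def cnt (c : Int) : List Int → Int
  | [] => 0
  | w :: t => (if w < c then 1 else 0) + cnt (max c w) t

lemma solve_alt_foldl (xs : List Int) (k c : Int) :
    (xs.foldl (fun (s : Int × Int) w =>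
        (if w < s.2 then s.1 + 1 else s.1, max s.2 w)) (k, c)).1 = k + cnt c xs := by
  induction xs generalizing k c with
  | nil => simp [cnt]
  | cons w t ih =>
      simp only [List.foldl_cons, cnt]
      rw [ih]
      split_ifs <;> ring

lemma solve_alt_eq (xs : List Int) : solve_alt xs = cnt 0 xs := by
  simpa using solve_alt_foldl xs 0 0

/-- The second loop of A only accumulates a count; `last_shipment_end` is dead state. -/
lemma second_loop_count (l : List Int) (p : Int → Prop) [DecidablePred p] (k e : Int) :
    (l.foldl (fun (s : Int × Int) i => if p i then (s.1 + 1, i - 1) else s) (k, e)).1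
      = k + (l.countP (fun i => decide (p i)) : Int) := by
  induction l generalizing k e with
  | nil => simp
  | cons i t ih =>
      simp only [List.foldl_cons, List.countP_cons]
      by_cases h : p i
      · rw [if_pos h, ih]; simp [h]; ring
      · rw [if_neg h, ih]; simp [h]

/-- Setting index `done.length` of `done ++ r :: rest` replaces `r`. -/
lemma pySetD_append (done : List Int) (r : Int) (rest : List Int) (v : Int) :
    PySem.List.pySetD (done ++ r :: rest) (done.length : Int) v
      = (done ++ [v]) ++ rest := by
  have h1 : (done.length : Int) < ((done ++ r :: rest).length : Int) := by simp
  simp only [PySem.List.pySetD, PySem.List.pySet?, PySem.List.pyIdx?]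
  rw [if_pos (by positivity), if_pos (by exact_mod_cast h1)]
  simp only [Option.map_some, Option.getD_some, Int.toNat_natCast]
  rw [List.set_append_right _ _ (le_refl _)]
  simp

/-- First loop invariant: folding A's first-loop body over indices
    `pre.length, …, pre.length + suf.length - 1` of `pre ++ suf`, starting from
    running max `c` and accumulator `done ++ rest` (entries past `pre.length`
    arbitrary), yields accumulator `done ++ pmax c suf`. -/
lemma first_loop_inv (pre suf rest : List Int) (c : Int) (done : List Int)
    (hd : done.length = pre.length) (hr : rest.length = suf.length) :
    ((PySem.List.pyRange (pre.length : Int) ((pre.length : Int) + suf.length) 1).foldl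
      (fun (s : Int × List Int) i =>
        let cm := max s.1 (PySem.List.pyGetD (pre ++ suf) i 0)
        (cm, PySem.List.pySetD s.2 i cm))
      (c, done ++ rest)).2 = done ++ pmax c suf := by
  induction suf generalizing pre c done rest with
  | nil =>
      rcases List.length_eq_zero_iff.mp hr with rfl
      rw [PySem.List.pyRange_one_eq_nil (by simp)]
      simp
  | cons w t ih =>
      rcases rest with _ | ⟨r, rest'⟩
      · simp at hr
      · have hlt : (pre.length : Int) < (pre.length : Int) + (w :: t).length := by
          simp
        rw [PySem.List.pyRange_one_cons hlt]
        simp only [List.foldl_cons]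
        have hget : PySem.List.pyGetD (pre ++ w :: t) (pre.length : Int) 0 = w := by
          rw [PySem.List.pyGetD_eq_getElem _ _ (by positivity) (by simp)]
          simp
        have hset : PySem.List.pySetD (done ++ r :: rest') (pre.length : Int) (max c w)
            = (done ++ [max c w]) ++ rest' := by
          rw [← hd]; exact pySetD_append done r rest' (max c w)
        rw [hget, hset]
        have := ih (pre ++ [w]) rest' (max c w) (done ++ [max c w])
          (by simp [hd]) (by simpa using hr)
        rw [show ((pre ++ [w]).length : Int) = (pre.length : Int) + 1 from by simp,
            show pre ++ [w] ++ t = pre ++ w :: t from by simp] at this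
        rw [show ((pre.length : Int) + (w :: t).length)
              = (pre.length : Int) + 1 + (t.length : Int) from by push_cast [List.length_cons]; ring]
        simpa using this

lemma first_loop_eq (xs : List Int) :
    ((PySem.List.pyRange 0 (xs.length : Int) 1).foldl
      (fun (s : Int × List Int) i =>
        let cm := max s.1 (PySem.List.pyGetD xs i 0)
        (cm, PySem.List.pySetD s.2 i cm))
      (0, List.replicate xs.length 0)).2 = pmax 0 xs := by
  have := first_loop_inv [] xs (List.replicate xs.length 0) 0 []
      (by simp) (by simp)
  simpa using this

/-- Indexwise comparison count over the range equals B's count on the list. -/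
lemma countP_range_eq_cnt (xs : List Int) (c : Int) :
    ((PySem.List.pyRange 0 (xs.length : Int) 1).countP
        (fun i => decide (PySem.List.pyGetD xs i 0 < PySem.List.pyGetD (pmax c xs) i 0)) : Int)
      = cnt c xs := by
  induction xs generalizing c with
  | nil => simp [PySem.List.pyRange_one_eq_nil, cnt]
  | cons w t ih =>
      have h1 : (0 : Int) < ((w :: t).length : Int) := by simp
      rw [PySem.List.pyRange_one_cons h1, List.countP_cons]
      simp only [zero_add]
      have hlen : ((w :: t).length : Int) = (t.length : Int) + 1 := by simp
      have hmap : PySem.List.pyRange 1 ((w :: t).length : Int)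
          = (PySem.List.pyRange 0 (t.length : Int)).map (fun j => j + 1) := by
        rw [hlen, PySem.List.pyRange_one 1 ((t.length : Int) + 1),
            PySem.List.pyRange_one 0 (t.length : Int)]
        simp [List.map_map, Function.comp_def, add_comm]
      have hgetw : ∀ (ys : List Int) (y : Int) (j : Int), 0 ≤ j →
          PySem.List.pyGetD (y :: ys) (j + 1) 0 = PySem.List.pyGetD ys j 0 := by
        intro ys y j hj
        rw [PySem.List.pyGetD_of_nonneg _ _ (by omega : (0:Int) ≤ j + 1),
            PySem.List.pyGetD_of_nonneg _ _ hj]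
        have : (j + 1).toNat = j.toNat + 1 := by omega
        simp [this]
      have htail : ((PySem.List.pyRange 1 ((w :: t).length : Int)).countP
            (fun i => decide (PySem.List.pyGetD (w :: t) i 0
                < PySem.List.pyGetD (pmax c (w :: t)) i 0)) : Int)
          = cnt (max c w) t := by
        rw [hmap, List.countP_map]
        rw [List.countP_congr (fun j hj => ?_)]
        · exact ih (max c w)
        · have hj0 : 0 ≤ j := (PySem.List.mem_pyRange_one.mp hj).1
          simp only [Function.comp, pmax_cons]
          simp only [hgetw t w j hj0, hgetw (pmax (max c w) t) (max c w) j hj0]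
      have hz : PySem.List.pyGetD (w :: t) (0 : Int) 0 = w :=
        PySem.List.pyGetD_zero_cons w t 0
      have hz' : PySem.List.pyGetD (pmax c (w :: t)) (0 : Int) 0 = max c w := by
        simp [PySem.List.pyGetD_zero_cons]
      push_cast
      rw [htail, hz, hz']
      have hiff : (w < max c w) ↔ (w < c) := by simp
      simp only [cnt, hiff, decide_eq_true_eq]
      split_ifs <;> ring

-- ===== VERDICT (by name: the statement is the Claim_ definition above) =====
theorem solve_spec : Claim_equal_solve := by
  intro weight _
  show solve weight = solve_alt weight
  simp only [solve]
  rw [first_loop_eq weight]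
  rw [second_loop_count _ (fun i =>
      PySem.List.pyGetD weight i 0 < PySem.List.pyGetD (pmax 0 weight) i 0)]
  rw [show PySem.List.pyRange ((weight.length : Int) - 1) (-1) (-1)
        = (PySem.List.pyRange 0 (weight.length : Int)).reverse from by
      rw [PySem.List.pyRange_neg_one_eq_reverse]; norm_num]
  rw [List.countP_reverse]
  rw [countP_range_eq_cnt weight 0, solve_alt_eq]
  ring
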